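-- pv_equiv track=rewrite | github.com/RasmussenLab/vamb | vamb/__main__.py | split_neighbourhoods_by_sample
-- ===== SOURCE A (Python) =====
-- def split_neighbourhoods_by_sample(neighbourhoods):
--     nbhds_split = dict()
--     for i,(nbhd_id, nbhd_cs) in enumerate(neighbourhoods.items()):
--         samples_in_nbhd = set([ c.split("C")[0] for c in nbhd_cs ])
--
--         nbhd_S_d = { S:set() for S in samples_in_nbhd}
--
--         for c in nbhd_cs:
--             nbhd_S_d[c.split("C")[0]].add(c)
--
--         # remove 1 contig neighbourhoods
--         nbhd_S_clean_d = { S:cs for S,cs in nbhd_S_d.items() if len(cs) > 1 }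
--
--
--
--         for S,cs in nbhd_S_clean_d.items():
--             nbhds_split["%i_%s"%(nbhd_id,S)] = cs
--
--     return nbhds_split
-- ===== SOURCE B (Python) =====
-- def split_neighbourhoods_by_sample(neighbourhoods):
--     nbhds_split = {}
--     for nbhd_id, nbhd_cs in neighbourhoods.items():
--         # distinct sample prefixes in first-occurrence order, then one filtering
--         # rescan of nbhd_cs per prefix (ordered dedup via dict.fromkeys); no
--         # bucket dict of sets is ever built.
--         for S in dict.fromkeys(c.split("C")[0] for c in nbhd_cs):
--             cs = dict.fromkeys(c for c in nbhd_cs if c.split("C")[0] == S)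
--             if len(cs) > 1:
--                 nbhds_split["%i_%s" % (nbhd_id, S)] = set(cs)
--     return nbhds_split
-- ===== Notes on version B (the rewrite author's own statement) =====
-- stated objective: alternative
-- what changed: Replaces A's hash-bucket grouping (collect the sample set, pre-initialise a dict of empty sets, populate it in one pass, then filter and re-key) by a bucket-free per-key traversal: for each distinct sample prefix (ordered dedup of the prefixes) one filtering rescan of the neighbourhood's contig list collects that prefix's contigs, kept if more than one.
import Mathlib
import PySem

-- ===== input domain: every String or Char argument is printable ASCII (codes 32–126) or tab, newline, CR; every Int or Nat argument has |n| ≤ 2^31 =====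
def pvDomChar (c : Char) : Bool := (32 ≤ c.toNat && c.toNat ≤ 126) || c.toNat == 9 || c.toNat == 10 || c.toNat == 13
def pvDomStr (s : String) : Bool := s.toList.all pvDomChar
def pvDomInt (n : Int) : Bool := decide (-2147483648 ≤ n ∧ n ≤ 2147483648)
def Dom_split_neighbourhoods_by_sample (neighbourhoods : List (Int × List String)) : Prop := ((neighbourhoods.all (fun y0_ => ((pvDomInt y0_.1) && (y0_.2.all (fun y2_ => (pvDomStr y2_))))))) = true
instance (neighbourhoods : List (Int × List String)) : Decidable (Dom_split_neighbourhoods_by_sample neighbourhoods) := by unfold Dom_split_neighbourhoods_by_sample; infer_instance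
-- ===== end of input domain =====

-- B replaces A's hash-bucket grouping (sample set, dict of empty sets, populate, filter, re-key)
-- by a bucket-free per-key traversal: for each distinct prefix, one filtering rescan of the
-- contig list (objective: alternative). Return-value equivalence only; neither mutates its input.

-- c.split("C")[0]; a split with non-empty separator is never empty, so the fallback is unreachable
def pvPfx (c : String) : String :=
  match PySem.Str.split? c "C" with
  | some (h :: _) => h
  | _ => ""

-- ===== PORT A =====
def split_neighbourhoods_by_sample (neighbourhoods : List (Int × List String)) : List (String × List String) :=
  ((PySem.Dict.ofList neighbourhoods).items.foldl (fun nbhds_split nb =>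
    let samples_in_nbhd : PySem.Set String := PySem.Set.ofList (nb.2.map pvPfx)
    let init : PySem.Dict String (PySem.Set String) :=
      samples_in_nbhd.foldl (fun d S => d.insert S PySem.Set.empty) PySem.Dict.empty
    -- nbhd_S_d[c.split("C")[0]].add(c): the key is always present, so modify-with-default is that lookup-and-add
    let nbhd_S_d := nb.2.foldl (fun d c => d.modify (pvPfx c) PySem.Set.empty (fun s => PySem.Set.add s c)) init
    -- the dict comprehension keeps the (distinct) keys of nbhd_S_d: it IS the filtered items list
    let nbhd_S_clean := nbhd_S_d.items.filter (fun p => decide (1 < p.2.length))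
    nbhd_S_clean.foldl (fun r p => r.insert (PySem.Int.toStr nb.1 ++ "_" ++ p.1) p.2) nbhds_split)
    PySem.Dict.empty).items

-- ===== PORT B =====
def split_neighbourhoods_by_sample_alt (neighbourhoods : List (Int × List String)) : List (String × List String) :=
  ((PySem.Dict.ofList neighbourhoods).items.foldl (fun nbhds_split nb =>
    -- dict.fromkeys over the prefixes = ordered dedup (PySem.List.dedup)
    (PySem.List.dedup (nb.2.map pvPfx)).foldl (fun nbhds_split S =>
      -- cs = dict.fromkeys(c for c in nbhd_cs if c.split("C")[0] == S)
      let cs := PySem.List.dedup (nb.2.filter (fun c => pvPfx c == S))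
      if 1 < cs.length then
        nbhds_split.insert (PySem.Int.toStr nb.1 ++ "_" ++ S) cs
      else nbhds_split) nbhds_split)
    PySem.Dict.empty).items

-- ===== PRECONDITION & SPEC =====
def Spec_split_neighbourhoods_by_sample (neighbourhoods : List (Int × List String)) (out : List (String × List String)) : Prop := out = split_neighbourhoods_by_sample_alt neighbourhoods
instance (neighbourhoods : List (Int × List String)) (out : List (String × List String)) : Decidable (Spec_split_neighbourhoods_by_sample neighbourhoods out) := by unfold Spec_split_neighbourhoods_by_sample; infer_instance

-- ===== CLAIM (what is proved, stated in full; the proofs are below) =====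
def Claim_equal_split_neighbourhoods_by_sample : Prop := ∀ (neighbourhoods : List (Int × List String)), Dom_split_neighbourhoods_by_sample neighbourhoods → Spec_split_neighbourhoods_by_sample neighbourhoods (split_neighbourhoods_by_sample neighbourhoods)

-- ===== LEMMAS AND PROOFS =====

-- A's per-neighbourhood dict of contig sets
def pvAD (cs : List String) : PySem.Dict String (PySem.Set String) :=
  cs.foldl (fun d c => d.modify (pvPfx c) PySem.Set.empty (fun s => PySem.Set.add s c))
    ((PySem.Set.ofList (cs.map pvPfx)).foldl (fun d S => d.insert S PySem.Set.empty) PySem.Dict.empty)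

theorem pv_set_add_of_mem {α : Type} [BEq α] [LawfulBEq α] (s : PySem.Set α) (x : α)
    (h : x ∈ s) : PySem.Set.add s x = s := by
  simp [PySem.Set.add, PySem.Set.contains, h]

theorem pv_set_update_of_mem {α : Type} [BEq α] [LawfulBEq α] (l : List α) (s : PySem.Set α)
    (h : ∀ x ∈ l, x ∈ s) : PySem.Set.update s l = s := by
  induction l generalizing s with
  | nil => rfl
  | cons x t ih =>
    show PySem.Set.update (PySem.Set.add s x) t = s
    rw [pv_set_add_of_mem s x (h x (by simp))]
    exact ih s (fun y hy => h y (by simp [hy]))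

theorem pv_keys_AD (cs : List String) : (pvAD cs).keys = PySem.Set.ofList (cs.map pvPfx) := by
  unfold pvAD
  rw [PySem.Dict.keys_foldl_modify_key cs pvPfx PySem.Set.empty (fun _ c => fun s => PySem.Set.add s c)]
  rw [PySem.Dict.keys_foldl_insert _ (fun _ _ => PySem.Set.empty)]
  rw [PySem.Dict.keys_empty]
  show PySem.Set.update (PySem.Set.ofList (PySem.Set.ofList (cs.map pvPfx))) (cs.map pvPfx)
      = PySem.Set.ofList (cs.map pvPfx)
  rw [PySem.Set.ofList_ofList]
  exact pv_set_update_of_mem _ _ (fun x hx => (PySem.Set.mem_ofList _ _).mpr hx)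

theorem pv_getD_initfold (l : List String) (d : PySem.Dict String (PySem.Set String)) (k : String)
    (h : d.getD k PySem.Set.empty = PySem.Set.empty) :
    (l.foldl (fun d S => d.insert S PySem.Set.empty) d).getD k PySem.Set.empty = PySem.Set.empty := by
  induction l generalizing d with
  | nil => simpa using h
  | cons x t ih =>
    simp only [List.foldl_cons]
    apply ih
    rw [PySem.Dict.getD_insert]
    split_ifs
    · rfl
    · exact h

theorem pv_getD_modifyfold {κ α ν : Type} [BEq κ] [LawfulBEq κ] [DecidableEq κ]
    (l : List α) (key : α → κ) (d0 : ν) (f : α → ν → ν) (d : PySem.Dict κ ν) (k : κ) :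
    (l.foldl (fun d c => d.modify (key c) d0 (f c)) d).getD k d0
      = (l.filter (fun c => key c == k)).foldl (fun s c => f c s) (d.getD k d0) := by
  induction l generalizing d with
  | nil => simp
  | cons x t ih =>
    simp only [List.foldl_cons, List.filter_cons]
    rw [ih]
    by_cases hx : key x = k
    · simp [hx]
    · simp [hx, PySem.Dict.getD_modify, Ne.symm hx]

-- the value A's per-neighbourhood dict holds at S is exactly B's per-prefix deduped rescan
theorem pv_getD_AD (cs : List String) (S : String) :
    (pvAD cs).getD S PySem.Set.empty = PySem.List.dedup (cs.filter (fun c => pvPfx c == S)) := by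
  unfold pvAD
  rw [pv_getD_modifyfold cs pvPfx PySem.Set.empty (fun c s => PySem.Set.add s c) _ S]
  rw [pv_getD_initfold _ _ _ (by rfl)]
  rw [PySem.List.dedup_eq_ofList]
  rfl

-- A's filtered items list, written through B's per-prefix values
theorem pv_items_AD (cs : List String) :
    (pvAD cs).items
      = (PySem.List.dedup (cs.map pvPfx)).map
          (fun S => (S, PySem.List.dedup (cs.filter (fun c => pvPfx c == S)))) := by
  have hnd : (pvAD cs).keys.Nodup := by
    rw [pv_keys_AD]; exact PySem.Set.nodup_ofList _
  rw [PySem.Dict.items_eq_map_keys _ hnd PySem.Set.empty, pv_keys_AD, PySem.List.dedup_eq_ofList]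
  exact List.map_congr_left (fun S _ => by rw [pv_getD_AD])

-- a fold over a filtered list is the fold with the test inlined
theorem pv_foldl_filter {α β : Type} (p : α → Bool) (f : β → α → β) (l : List α) (b : β) :
    (l.filter p).foldl f b = l.foldl (fun b x => if p x then f b x else b) b := by
  induction l generalizing b with
  | nil => rfl
  | cons x t ih =>
    by_cases hx : p x <;> simp [hx, ih]

theorem pv_main (neighbourhoods : List (Int × List String)) :
    split_neighbourhoods_by_sample neighbourhoods = split_neighbourhoods_by_sample_alt neighbourhoods := by
  unfold split_neighbourhoods_by_sample split_neighbourhoods_by_sample_alt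
  congr 1
  apply PySem.List.foldl_congr_mem
  intro acc nb _
  show ((pvAD nb.2).items.filter (fun p => decide (1 < p.2.length))).foldl
      (fun r p => r.insert (PySem.Int.toStr nb.1 ++ "_" ++ p.1) p.2) acc = _
  rw [pv_items_AD, List.filter_map, List.foldl_map, pv_foldl_filter]
  apply PySem.List.foldl_congr_mem
  intro b S _
  simp [Function.comp]

-- ===== VERDICT (by name: the statement is the Claim_ definition above) =====
theorem split_neighbourhoods_by_sample_spec : Claim_equal_split_neighbourhoods_by_sample := by
  intro n _
  unfold Spec_split_neighbourhoods_by_sample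
  exact pv_main n
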